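-- pv_equiv track=rewrite | github.com/lucasea777/mys | parc_guille.py | calculo_r
-- ===== SOURCE A (Python) =====
-- def calculo_r(muestra1,muestra2):
--     n = len(muestra1)
--     r=0
--     lista = muestra1 + muestra2
--
--     lista.sort()
--
--
--     for i in range(0,len(muestra1)):
--        r = r + (lista.index(muestra1[i]) + 1)
--
--     return r
-- ===== SOURCE B (Python) =====
-- def calculo_r(muestra1, muestra2):
--     # Rank of x in sorted(m1+m2) (first occurrence, 1-based) = 1 + (# elements < x).
--     # So: count occurrences of each value, sort only the distinct values, and turn
--     # the counts into prefix sums "number of elements strictly below v".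
--     cnt = {}
--     for x in muestra1:
--         cnt[x] = cnt.get(x, 0) + 1
--     for x in muestra2:
--         cnt[x] = cnt.get(x, 0) + 1
--     below = {}
--     acc = 0
--     for v in sorted(cnt):
--         below[v] = acc
--         acc += cnt[v]
--     r = 0
--     for x in muestra1:
--         r += below[x] + 1
--     return r
-- ===== Notes on version B (the rewrite author's own statement) =====
-- stated objective: faster
-- what changed: Instead of sorting the whole concatenation and scanning it for each element's first index, B counts occurrences of each value in a dict, sorts only the distinct values, turns the counts into prefix sums (elements strictly below each value), and reads each rank as below[x]+1.
import Mathlib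
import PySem

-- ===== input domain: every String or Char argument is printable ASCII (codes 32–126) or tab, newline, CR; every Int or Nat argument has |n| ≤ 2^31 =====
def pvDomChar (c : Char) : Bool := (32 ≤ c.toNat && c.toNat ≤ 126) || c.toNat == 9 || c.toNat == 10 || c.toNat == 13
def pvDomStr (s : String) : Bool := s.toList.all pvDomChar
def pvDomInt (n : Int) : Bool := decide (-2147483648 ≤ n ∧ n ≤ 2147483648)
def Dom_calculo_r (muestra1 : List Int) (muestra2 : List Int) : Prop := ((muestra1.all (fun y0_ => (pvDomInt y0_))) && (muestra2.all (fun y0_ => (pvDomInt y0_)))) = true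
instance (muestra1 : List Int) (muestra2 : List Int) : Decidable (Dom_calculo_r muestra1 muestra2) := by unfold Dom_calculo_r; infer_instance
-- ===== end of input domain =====

-- B replaces sort-the-concatenation-and-scan-for-first-index by counting occurrences, sorting only the
-- distinct values and prefix-summing the counts (rank = 1 + #elements strictly below); faster, asymptotic.


-- ===== PORT A =====
-- literal port of A: sort the concatenation, then for each i in range(len(muestra1))
-- add lista.index(muestra1[i]) + 1; index? never returns none here (the element is in
-- lista) and i is always in range, so .getD only totalises the primitives.
def calculo_r (muestra1 : List Int) (muestra2 : List Int) : Int :=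
  let _n : Int := muestra1.length
  let lista := PySem.List.sorted (muestra1 ++ muestra2) (fun x => x) false
  (PySem.List.pyRange 0 (muestra1.length : Int) 1).foldl
    (fun r i =>
      r + ((((PySem.List.index? lista (PySem.List.pyGetD muestra1 i 0)).getD 0 : Nat) : Int) + 1))
    0

-- ===== PORT B =====
-- port of B: build the count dict with two get/insert loops, fold over sorted(cnt) keeping
-- (below, acc) to record the number of elements strictly below each value, then one loop
-- over muestra1 adding below[x] + 1 (below[x] never misses: x is a key of cnt; getD totalises).
def calculo_r_alt (muestra1 : List Int) (muestra2 : List Int) : Int :=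
  let cnt1 := muestra1.foldl (fun d x => d.insert x (d.getD x 0 + 1)) (PySem.Dict.empty : PySem.Dict Int Int)
  let cnt := muestra2.foldl (fun d x => d.insert x (d.getD x 0 + 1)) cnt1
  let st := (PySem.List.sorted cnt.keys (fun v => v) false).foldl
      (fun s v => (s.1.insert v s.2, s.2 + cnt.getD v 0)) (PySem.Dict.empty, (0 : Int))
  muestra1.foldl (fun r x => r + (st.1.getD x 0 + 1)) 0

-- ===== PRECONDITION & SPEC =====
def Spec_calculo_r (muestra1 : List Int) (muestra2 : List Int) (out : Int) : Prop := out = calculo_r_alt muestra1 muestra2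
instance (muestra1 : List Int) (muestra2 : List Int) (out : Int) : Decidable (Spec_calculo_r muestra1 muestra2 out) := by unfold Spec_calculo_r; infer_instance

-- ===== CLAIM (what is proved, stated in full; the proofs are below) =====
def Claim_equal_calculo_r : Prop := ∀ (muestra1 : List Int) (muestra2 : List Int), Dom_calculo_r muestra1 muestra2 → Spec_calculo_r muestra1 muestra2 (calculo_r muestra1 muestra2)

-- ===== LEMMAS AND PROOFS =====

-- the (below, acc) fold leaves keys it never visits alone
theorem prefix_fold_notMem (g : Int → Int) (ks : List Int) (d : PySem.Dict Int Int)
    (a : Int) (x : Int) (hx : x ∉ ks) :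
    ((ks.foldl (fun s v => (s.1.insert v s.2, s.2 + g v)) (d, a)).1).getD x 0 = d.getD x 0 := by
  induction ks generalizing d a with
  | nil => rfl
  | cons k t ih =>
    simp only [List.foldl_cons]
    rw [ih _ _ (fun h => hx (List.mem_cons_of_mem _ h))]
    exact PySem.Dict.getD_insert_of_ne _ _ _ (fun h => hx (h ▸ List.mem_cons_self))

-- on a strictly increasing key list, the (below, acc) fold records at x the sum of g over keys < x
theorem prefix_fold_getD (g : Int → Int) (ks : List Int) (d : PySem.Dict Int Int)
    (a : Int) (x : Int) (hx : x ∈ ks) (hp : ks.Pairwise (· < ·)) :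
    ((ks.foldl (fun s v => (s.1.insert v s.2, s.2 + g v)) (d, a)).1).getD x 0
      = a + ((ks.filter (fun v => decide (v < x))).map g).sum := by
  induction ks generalizing d a with
  | nil => cases hx
  | cons k t ih =>
    rcases List.pairwise_cons.mp hp with ⟨hk, hpt⟩
    simp only [List.foldl_cons]
    rcases List.mem_cons.mp hx with hxk | hxt
    · subst hxk
      have hnot : x ∉ t := fun h => lt_irrefl x (hk x h)
      rw [prefix_fold_notMem g t _ _ _ hnot, PySem.Dict.getD_insert_self]
      have h1 : (decide (x < x)) = false := by simp
      have h2 : t.filter (fun v => decide (v < x)) = [] := by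
        apply List.filter_eq_nil_iff.mpr
        intro v hv
        simp only [decide_eq_true_eq]
        exact not_lt.mpr (le_of_lt (hk v hv))
      simp [h2]
    · have hkx : k < x := hk x hxt
      rw [ih _ _ hxt hpt]
      have : (k :: t).filter (fun v => decide (v < x)) = k :: t.filter (fun v => decide (v < x)) := by
        simp [hkx]
      rw [this]
      simp only [List.map_cons, List.sum_cons]
      ring

-- countP over L is the sum, over any duplicate-free list K covering L's elements, of L's counts at the v ∈ K with p v
theorem countP_eq_sum_counts (p : Int → Bool) (K : List Int) (L : List Int)
    (hnd : K.Nodup) (hsub : ∀ y ∈ L, y ∈ K) :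
    ((K.filter p).map (fun v => ((L.count v : Nat) : Int))).sum = ((L.countP p : Nat) : Int) := by
  induction L with
  | nil => simp
  | cons y L ih =>
    have hy : y ∈ K := hsub y List.mem_cons_self
    have hsub' : ∀ z ∈ L, z ∈ K := fun z hz => hsub z (List.mem_cons_of_mem _ hz)
    have hcnt : ∀ v : Int, (((y :: L).count v : Nat) : Int)
        = ((L.count v : Nat) : Int) + (if (fun w => decide (w = y)) v = true then 1 else 0) := by
      intro v
      rw [List.count_cons]
      by_cases h : v = y
      · simp [h]
      · simp [h, Ne.symm h]
    have hsplit : ((K.filter p).map (fun v => (((y :: L).count v : Nat) : Int))).sum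
        = ((K.filter p).map (fun v => ((L.count v : Nat) : Int))).sum
          + ((K.filter p).map (fun v => if (fun w => decide (w = y)) v = true then (1 : Int) else 0)).sum := by
      rw [← PySem.List.sum_map_add_int]
      exact congrArg List.sum (List.map_congr_left (fun v _ => hcnt v))
    have hind : ((K.filter p).map (fun v => if (fun w => decide (w = y)) v = true then (1 : Int) else 0)).sum
        = if p y then 1 else 0 := by
      rw [PySem.List.sum_map_ite_one_zero]
      have hfn : (K.filter p).Nodup := hnd.filter p
      by_cases hpy : p y = true
      · have hmem : y ∈ K.filter p := List.mem_filter.mpr ⟨hy, hpy⟩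
        have h1 : (K.filter p).countP (fun w => decide (w = y)) = 1 := by
          have := List.count_eq_one_of_mem hfn hmem
          simpa [List.count_eq_countP] using this
        simp [h1, hpy]
      · have hnm : y ∉ K.filter p := fun h => hpy (List.mem_filter.mp h).2
        have h0 : (K.filter p).countP (fun w => decide (w = y)) = 0 := by
          have := List.count_eq_zero_of_not_mem hnm
          simpa [List.count_eq_countP] using this
        simp [h0, hpy]
    rw [hsplit, ih hsub', hind, List.countP_cons]
    by_cases hpy : p y = true <;> simp [hpy]

-- in the sorted concatenation, the first index of x ∈ L is the number of elements of L strictly below x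
theorem index_sorted_eq_countP (L : List Int) (x : Int) (hx : x ∈ L) :
    (((PySem.List.index? (PySem.List.sorted L (fun v => v) false) x).getD 0 : Nat) : Int)
      = ((L.countP (fun y => decide (y < x)) : Nat) : Int) := by
  set S := PySem.List.sorted L (fun v => v) false with hS
  have hxS : x ∈ S := (PySem.List.mem_sorted L (fun v => v) false x).mpr hx
  have hsome : (PySem.List.index? S x).isSome := (PySem.List.index?_isSome_iff S x).mpr hxS
  rcases Option.isSome_iff_exists.mp hsome with ⟨k, hk⟩
  rcases (PySem.List.index?_eq_some_iff S x k).mp hk with ⟨pre, suf, hSplit, hlen, hxpre⟩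
  have hpw : S.Pairwise (fun a b => a ≤ b) := PySem.List.sorted_pairwise L (fun v => v)
  rw [hSplit] at hpw
  rcases List.pairwise_append.mp hpw with ⟨hpre, hcons, hcross⟩
  rcases List.pairwise_cons.mp hcons with ⟨hxsuf, _⟩
  have hperm : S.Perm L := PySem.List.sorted_perm L (fun v => v) false
  have hcount : L.countP (fun y => decide (y < x)) = S.countP (fun y => decide (y < x)) :=
    (List.Perm.countP_eq _ hperm).symm
  have hSc : S.countP (fun y => decide (y < x)) = k := by
    rw [hSplit, List.countP_append, List.countP_cons]
    have h1 : pre.countP (fun y => decide (y < x)) = pre.length := by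
      apply List.countP_eq_length.mpr
      intro a ha
      have hle : a ≤ x := hcross a ha x List.mem_cons_self
      have hne : a ≠ x := fun h => hxpre (h ▸ ha)
      simpa using lt_of_le_of_ne hle hne
    have h2 : suf.countP (fun y => decide (y < x)) = 0 := by
      apply List.countP_eq_zero.mpr
      intro b hb
      simpa using not_lt.mpr (hxsuf b hb)
    simp [h1, h2, hlen]
  rw [hk, hcount, hSc]
  rfl

-- ===== VERDICT (by name: the statement is the Claim_ definition above) =====
theorem calculo_r_spec : Claim_equal_calculo_r := by
  intro m1 m2 _
  unfold Spec_calculo_r calculo_r calculo_r_alt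
  simp only []
  rw [PySem.List.foldl_pyRange_zero_pyGetD' m1 0
    (fun r x => r + ((((PySem.List.index? (PySem.List.sorted (m1 ++ m2) (fun v => v) false) x).getD 0 : Nat) : Int) + 1)) 0]
  rw [PySem.List.foldl_add, PySem.List.foldl_add]
  congr 1
  apply congrArg List.sum
  apply List.map_congr_left
  intro x hx
  have hxL : x ∈ m1 ++ m2 := List.mem_append.mpr (Or.inl hx)
  -- A's summand
  rw [index_sorted_eq_countP (m1 ++ m2) x hxL]
  -- B's summand: identify the count dict and the sorted distinct keys
  set cnt1 := m1.foldl (fun d x => d.insert x (d.getD x 0 + 1)) (PySem.Dict.empty : PySem.Dict Int Int) with hc1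
  set cnt := m2.foldl (fun d x => d.insert x (d.getD x 0 + 1)) cnt1 with hc
  have hkeys : cnt.keys = PySem.Set.ofList (m1 ++ m2) := by
    rw [hc, PySem.Dict.keys_foldl_insert, hc1, PySem.Dict.keys_foldl_insert,
      PySem.Dict.keys_empty]
    show PySem.Set.update (PySem.Set.ofList m1) m2 = _
    rw [PySem.Set.ofList_eq_foldl, PySem.Set.ofList_eq_foldl, List.foldl_append]
    rfl
  have hgetD : ∀ v : Int, cnt.getD v 0 = (((m1 ++ m2).count v : Nat) : Int) := by
    intro v
    rw [hc, PySem.Dict.getD_foldl_insert_add_one, hc1, PySem.Dict.getD_foldl_insert_add_one,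
      PySem.Dict.getD_empty, List.count_append]
    push_cast
    ring
  rw [hkeys]
  have hplt : (PySem.List.sorted (PySem.Set.ofList (m1 ++ m2)) (fun v => v) false).Pairwise (· < ·) :=
    PySem.List.sorted_ofList_pairwise_lt (m1 ++ m2)
  have hxK : x ∈ PySem.List.sorted (PySem.Set.ofList (m1 ++ m2)) (fun v => v) false :=
    (PySem.List.mem_sorted _ _ _ x).mpr ((PySem.Set.mem_ofList _ x).mpr hxL)
  rw [prefix_fold_getD (fun v => cnt.getD v 0) _ _ _ x hxK hplt]
  have hmapc : ((PySem.List.sorted (PySem.Set.ofList (m1 ++ m2)) (fun v => v) false).filter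
        (fun v => decide (v < x))).map (fun v => cnt.getD v 0)
      = ((PySem.List.sorted (PySem.Set.ofList (m1 ++ m2)) (fun v => v) false).filter
        (fun v => decide (v < x))).map (fun v => (((m1 ++ m2).count v : Nat) : Int)) :=
    List.map_congr_left (fun v _ => hgetD v)
  rw [hmapc, countP_eq_sum_counts (fun y => decide (y < x)) _ (m1 ++ m2)
    (List.Pairwise.imp ne_of_lt hplt)
    (fun y hy => (PySem.List.mem_sorted _ _ _ y).mpr ((PySem.Set.mem_ofList _ y).mpr hy))]
  ring
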